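-- pv_equiv track=rewrite | github.com/ilialecha/Programming_1 | Lists/List_8/program(5).py | short_power7_chains
-- ===== SOURCE A (Python) =====
-- def is_power7(n):
--     if n == 0:
--         return False
--     while n != 1:
--         if n%7 != 0:
--             return False
--         n = n//7
--     return True
--
-- def short_power7_chains(f, k):
-- 	'''
-- 	>>> short_power7_chains([1, 7, 49, 7*7*7, 2], 3)
-- 	False
-- 	>>> short_power7_chains([1, 7, 49, 7*7*7, 2], 4)
-- 	True
-- 	>>> short_power7_chains([1, 7, 14, 7*7*7, 21, 28], 2)
-- 	True
-- 	>>> short_power7_chains([14, 7], 1)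
-- 	True
-- 	>>> short_power7_chains([], 1)
-- 	True
-- 	'''
-- 	c = 0
-- 	for s in f:
-- 		if is_power7(s) and c < k:
-- 			c += 1
-- 		elif not is_power7(s):
-- 			c = 0
-- 		else:
-- 			return False
-- 	return True
-- ===== SOURCE B (Python) =====
-- def is_power7(n):
--     if n == 0:
--         return False
--     while n != 1:
--         if n % 7 != 0:
--             return False
--         n = n // 7
--     return True
--
-- def short_power7_chains(f, k):
--     # Partition f into maximal runs of powers of 7, collect their lengths,
--     # then check every run length is at most k.
--     runs = []
--     run = 0
--     for s in f:
--         if is_power7(s):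
--             run += 1
--         else:
--             if run:
--                 runs.append(run)
--             run = 0
--     if run:
--         runs.append(run)
--     return all(r <= k for r in runs)
-- ===== Notes on version B (the rewrite author's own statement) =====
-- stated objective: alternative
-- what changed: Replaces A's capped counter-with-reset and mid-loop early return by a partition pass that collects the lengths of all maximal power-of-7 runs and then checks all(r <= k).
import Mathlib
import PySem

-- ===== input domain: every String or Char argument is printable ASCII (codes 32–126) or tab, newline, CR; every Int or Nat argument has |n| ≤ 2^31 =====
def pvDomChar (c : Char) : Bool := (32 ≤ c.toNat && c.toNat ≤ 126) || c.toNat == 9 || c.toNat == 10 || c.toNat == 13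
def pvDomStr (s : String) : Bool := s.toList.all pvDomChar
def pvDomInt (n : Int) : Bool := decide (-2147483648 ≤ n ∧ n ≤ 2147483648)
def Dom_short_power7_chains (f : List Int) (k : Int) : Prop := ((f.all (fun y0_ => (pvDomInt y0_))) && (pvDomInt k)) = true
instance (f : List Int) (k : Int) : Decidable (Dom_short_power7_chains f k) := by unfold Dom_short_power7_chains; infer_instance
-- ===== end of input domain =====

-- B replaces A's capped counter-with-reset and early exit by a partition-into-runs pass
-- followed by an 'all run lengths ≤ k' check (objective: idiomatic/alternative, same cost).

-- ===== PORT A =====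
-- the 'while n != 1' loop of is_power7; the 'n = 0' guard only makes the
-- recursion total (is_power7 never reaches the loop with n = 0)
def pow7loop (n : Int) : Bool :=
  if _h0 : n = 0 then false
  else if n = 1 then true
  else if PySem.Int.mod n 7 ≠ 0 then false
  else pow7loop (PySem.Int.floordiv n 7)
termination_by n.natAbs
decreasing_by
  rename_i h2
  rw [PySem.Int.mod_eq_emod_of_pos (by norm_num)] at h2
  have h7 : (7 : Int) ∣ n := Int.dvd_of_emod_eq_zero (by omega)
  rw [PySem.Int.floordiv_eq_ediv_of_pos (by norm_num)]
  obtain ⟨q, rfl⟩ := h7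
  rw [Int.mul_ediv_cancel_left _ (by norm_num)]
  have : q ≠ 0 := by rintro rfl; simp at _h0
  simp [Int.natAbs_mul]
  omega

def isPower7 (n : Int) : Bool := if n = 0 then false else pow7loop n

def aLoop (f : List Int) (k : Int) (c : Int) : Bool :=
  match f with
  | [] => true
  | s :: t =>
      if isPower7 s = true ∧ c < k then aLoop t k (c + 1)
      else if isPower7 s = false then aLoop t k 0
      else false

def short_power7_chains (f : List Int) (k : Int) : Bool := aLoop f k 0

-- ===== PORT B =====
-- Source B also defines is_power7 verbatim; its port reuses isPower7 above.
def altStep (st : List Int × Int) (s : Int) : List Int × Int :=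
  if isPower7 s then (st.1, st.2 + 1)
  else if st.2 ≠ 0 then (st.1 ++ [st.2], 0)
  else (st.1, 0)

def finalizeRuns (st : List Int × Int) : List Int :=
  if st.2 ≠ 0 then st.1 ++ [st.2] else st.1

def short_power7_chains_alt (f : List Int) (k : Int) : Bool :=
  (finalizeRuns (f.foldl altStep ([], 0))).all (fun r => decide (r ≤ k))

-- ===== PRECONDITION & SPEC =====
def Spec_short_power7_chains (f : List Int) (k : Int) (out : Bool) : Prop := out = short_power7_chains_alt f k
instance (f : List Int) (k : Int) (out : Bool) : Decidable (Spec_short_power7_chains f k out) := by unfold Spec_short_power7_chains; infer_instance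

-- ===== CLAIM (what is proved, stated in full; the proofs are below) =====
def Claim_equal_short_power7_chains : Prop := ∀ (f : List Int) (k : Int), Dom_short_power7_chains f k → Spec_short_power7_chains f k (short_power7_chains f k)

-- ===== LEMMAS AND PROOFS =====

-- the closed-runs accumulator is only ever appended to
theorem foldl_altStep_prepend (f : List Int) (rs : List Int) (c : Int) :
    f.foldl altStep (rs, c) =
      (rs ++ (f.foldl altStep ([], c)).1, (f.foldl altStep ([], c)).2) := by
  induction f generalizing rs c with
  | nil => simp
  | cons s t ih =>
      simp only [List.foldl_cons, altStep]
      by_cases hp : isPower7 s = true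
      · simp only [hp, if_pos]
        rw [ih rs (c + 1)]
      · by_cases hc : c ≠ 0
        · simp only [hp, Bool.false_eq_true, if_false, if_pos hc, List.nil_append]
          rw [ih (rs ++ [c]) 0, ih [c] 0]
          simp
        · simp only [hp, Bool.false_eq_true, if_false, if_neg hc]
          rw [ih rs 0, ih [] 0]

-- B's result from a pending run of length c, for use in the loop invariant
def bRes (f : List Int) (k : Int) (c : Int) : Bool :=
  (finalizeRuns (f.foldl altStep ([], c))).all (fun r => decide (r ≤ k))

theorem bRes_overflow (f : List Int) (k c : Int) (hc : 0 < c) (hk : k < c) :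
    bRes f k c = false := by
  induction f generalizing c with
  | nil =>
      simp [bRes, finalizeRuns, (by omega : c ≠ 0)]
      omega
  | cons s t ih =>
      simp only [bRes, List.foldl_cons, altStep]
      by_cases hp : isPower7 s = true
      · simp only [hp, if_pos]
        exact ih (c + 1) (by omega) (by omega)
      · simp only [hp, Bool.false_eq_true, if_false, if_pos (by omega : c ≠ 0)]
        simp only [List.nil_append]
        rw [foldl_altStep_prepend t [c] 0]
        have hcf : decide (c ≤ k) = false := by simp; omega
        simp only [finalizeRuns]
        by_cases h2 : (t.foldl altStep ([], 0)).2 ≠ 0 <;>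
          simp [h2, List.all_append, hcf]

theorem aLoop_eq_bRes (f : List Int) (k c : Int) (hc : 0 ≤ c) (h : c ≤ k ∨ c = 0) :
    aLoop f k c = bRes f k c := by
  induction f generalizing c with
  | nil =>
      rcases h with h | h
      · by_cases h0 : c = 0 <;> simp [aLoop, bRes, finalizeRuns, h0, h]
      · simp [aLoop, bRes, finalizeRuns, h]
  | cons s t ih =>
      simp only [aLoop, bRes, List.foldl_cons, altStep]
      by_cases hp : isPower7 s = true
      · by_cases hck : c < k
        · simp only [hp, hck, and_self, if_true, if_pos]
          exact ih (c + 1) (by omega) (Or.inl (by omega))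
        · simp only [hp, hck, and_false, if_false, Bool.true_eq_false, if_pos,
            eq_self_iff_true, true_and, if_neg hck]
          have := bRes_overflow t k (c + 1) (by omega) (by omega)
          simp only [bRes] at this
          rw [this]
      · have hpf : isPower7 s = false := by simpa using hp
        simp only [hp, hpf, false_and, if_false, Bool.false_eq_true, eq_self_iff_true, if_true]
        by_cases h0 : c = 0
        · subst h0
          have := ih 0 le_rfl (Or.inr rfl)
          simpa [bRes] using this
        · have hck : c ≤ k := by tauto
          simp only [Bool.false_eq_true, if_false, if_pos h0, List.nil_append]
          rw [foldl_altStep_prepend t [c] 0]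
          have := ih 0 le_rfl (Or.inr rfl)
          simp only [bRes] at this
          rw [this]
          simp only [finalizeRuns]
          by_cases h2 : (t.foldl altStep ([], 0)).2 ≠ 0 <;>
            simp_all [List.all_append, hck]

-- ===== VERDICT (by name: the statement is the Claim_ definition above) =====
theorem short_power7_chains_spec : Claim_equal_short_power7_chains := by
  intro f k _
  show short_power7_chains f k = short_power7_chains_alt f k
  exact aLoop_eq_bRes f k 0 le_rfl (Or.inr rfl)
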